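-- pv_equiv track=rewrite | github.com/edendir/advent_of_code_2024 | day_4.py | get_diagonals
-- ===== SOURCE A (Python) =====
-- def get_diagonals(lines):
--     diagonals = []
--     rows, cols = len(lines), len(lines[0])
--
--     # Top-left to bottom-right diagonals
--     for d in range(rows + cols - 1):
--         diagonal = "".join(
--             lines[i][d - i] for i in range(max(0, d - cols + 1), min(d + 1, rows))
--         )
--         diagonals.append(diagonal)
--
--     # Top-right to bottom-left diagonals
--     for d in range(rows + cols - 1):
--         diagonal = "".join(
--             lines[i][cols - 1 - (d - i)]
--             for i in range(max(0, d - cols + 1), min(d + 1, rows))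
--         )
--         diagonals.append(diagonal)
--
--     return diagonals
-- ===== SOURCE B (Python) =====
-- def get_diagonals(lines):
--     rows, cols = len(lines), len(lines[0])
--     n = rows + cols - 1
--     main = [[] for _ in range(n)]
--     anti = [[] for _ in range(n)]
--     for i, row in enumerate(lines):
--         for j in range(cols):
--             ch = row[j]
--             main[i + j].append(ch)
--             anti[i - j + cols - 1].append(ch)
--     return ["".join(b) for b in main] + ["".join(b) for b in anti]
-- ===== Notes on version B (the rewrite author's own statement) =====
-- stated objective: alternative
-- what changed: A computes each of the 2(rows+cols-1) diagonals by a separate index-arithmetic comprehension over a per-diagonal range; B makes a single pass over the grid cells, distributing each character into pre-allocated main/anti diagonal buckets (bucket i+j and i-j+cols-1) and joining the buckets at the end.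
import Mathlib
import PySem

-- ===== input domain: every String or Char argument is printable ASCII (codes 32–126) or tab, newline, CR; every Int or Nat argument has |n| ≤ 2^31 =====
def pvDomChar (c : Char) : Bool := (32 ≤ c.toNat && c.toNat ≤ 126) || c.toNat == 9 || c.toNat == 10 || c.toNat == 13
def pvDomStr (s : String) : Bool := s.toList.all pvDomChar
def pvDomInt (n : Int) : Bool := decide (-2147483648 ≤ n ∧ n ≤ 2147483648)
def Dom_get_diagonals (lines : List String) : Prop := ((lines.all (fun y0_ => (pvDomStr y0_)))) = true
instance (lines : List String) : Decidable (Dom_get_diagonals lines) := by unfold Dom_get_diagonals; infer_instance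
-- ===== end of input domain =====

-- B replaces A's per-diagonal index-arithmetic comprehensions by one pass over the grid that
-- distributes each character into pre-allocated main/anti diagonal buckets (objective: alternative).

-- ===== PORT A =====
def get_diagonals (lines : List String) : List String :=
  let rows : Int := (lines.length : Int)
  let cols : Int := PySem.Str.len ((PySem.List.pyGet? lines 0).getD "")
  let diag1 := (PySem.List.pyRange 0 (rows + cols - 1)).map (fun d =>
    String.ofList ((PySem.List.pyRange (max 0 (d - cols + 1)) (min (d + 1) rows)).map
      (fun i => (PySem.Str.pyGet? ((PySem.List.pyGet? lines i).getD "") (d - i)).getD ' ')))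
  let diag2 := (PySem.List.pyRange 0 (rows + cols - 1)).map (fun d =>
    String.ofList ((PySem.List.pyRange (max 0 (d - cols + 1)) (min (d + 1) rows)).map
      (fun i => (PySem.Str.pyGet? ((PySem.List.pyGet? lines i).getD "") (cols - 1 - (d - i))).getD ' ')))
  diag1 ++ diag2

-- ===== PORT B =====
def get_diagonals_alt (lines : List String) : List String :=
  let rows := lines.length
  let cols := ((PySem.List.pyGet? lines 0).getD "").toList.length
  let n := rows + cols - 1
  let init : List (List Char) := List.replicate n []
  let p := lines.zipIdx.foldl
    (fun (st : List (List Char) × List (List Char)) (ri : String × Nat) =>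
      (List.range cols).foldl
        (fun (st2 : List (List Char) × List (List Char)) (j : Nat) =>
          let ch := (PySem.Str.pyGet? ri.1 (j : Int)).getD ' '
          (st2.1.modify (ri.2 + j) (fun b => b ++ [ch]),
           st2.2.modify (ri.2 + cols - 1 - j) (fun b => b ++ [ch]))) st)
    (init, init)
  p.1.map String.ofList ++ p.2.map String.ofList

-- ===== PRECONDITION & SPEC =====
-- Pre_ excludes exactly the inputs where A raises: the empty list (lines[0] is an IndexError)
-- and grids containing a row shorter than the first row (lines[i][j] is an IndexError there);
-- B raises there too.
def Pre_get_diagonals (lines : List String) : Prop :=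
  lines ≠ [] ∧ ∀ s ∈ lines, (lines.headD "").toList.length ≤ s.toList.length
instance (lines : List String) : Decidable (Pre_get_diagonals lines) := by
  unfold Pre_get_diagonals; infer_instance

def pvWitness_get_diagonals : List String := ["ab", "cd"]

def Spec_get_diagonals (lines : List String) (out : List String) : Prop := out = get_diagonals_alt lines
instance (lines : List String) (out : List String) : Decidable (Spec_get_diagonals lines out) := by unfold Spec_get_diagonals; infer_instance

-- ===== CLAIM (what is proved, stated in full; the proofs are below) =====
def Claim_equal_get_diagonals : Prop := ∀ (lines : List String), Dom_get_diagonals lines → Pre_get_diagonals lines → Spec_get_diagonals lines (get_diagonals lines)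

-- ===== LEMMAS AND PROOFS =====

-- B's inner fold (one row) and outer fold (all rows), named so lemmas can speak about them.
def pvInner (cols i : Nat) (st : List (List Char) × List (List Char)) (l : List (Char × Nat)) :
    List (List Char) × List (List Char) :=
  l.foldl
    (fun (st2 : List (List Char) × List (List Char)) (cj : Char × Nat) =>
      (st2.1.modify (i + cj.2) (fun b => b ++ [cj.1]),
       st2.2.modify (i + cols - 1 - cj.2) (fun b => b ++ [cj.1]))) st

def pvOuter (cols : Nat) (st : List (List Char) × List (List Char)) (l : List (String × Nat)) :
    List (List Char) × List (List Char) :=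
  l.foldl
    (fun (st : List (List Char) × List (List Char)) (ri : String × Nat) =>
      pvInner cols ri.2 st (ri.1.toList.take cols).zipIdx) st

-- General form of the bridge: folding B's indexed loop over range' k |ys| equals pvInner
-- over ys.zipIdx k, when ys agrees with s's characters from position k on.
theorem pvBridge' (cols i : Nat) (s : String) :
    ∀ (ys : List Char) (k : Nat), (∀ m, m < ys.length → s.toList[k + m]? = ys[m]?) →
    ∀ st : List (List Char) × List (List Char),
      (List.range' k ys.length).foldl
        (fun (st2 : List (List Char) × List (List Char)) (j : Nat) =>
          let ch := (PySem.Str.pyGet? s (j : Int)).getD ' '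
          (st2.1.modify (i + j) (fun b => b ++ [ch]),
           st2.2.modify (i + cols - 1 - j) (fun b => b ++ [ch]))) st
      = pvInner cols i st (ys.zipIdx k) := by
  intro ys
  induction ys with
  | nil => intro k _ st; simp [pvInner]
  | cons c ys ih =>
    intro k h st
    have hc : (PySem.Str.pyGet? s (k : Int)).getD ' ' = c := by
      have h0 := h 0 (by simp)
      simp only [Nat.add_zero, List.getElem?_cons_zero] at h0
      rw [PySem.Str.pyGet?_eq]
      simp only [PySem.Chars.pyGet?]
      rw [PySem.List.pyGet?_natCast, h0]
      rfl
    have h' : ∀ m, m < ys.length → s.toList[(k + 1) + m]? = ys[m]? := by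
      intro m hm
      have := h (m + 1) (by simpa using Nat.succ_lt_succ hm)
      simpa [Nat.add_assoc, Nat.add_comm 1 m] using this
    simp only [List.length_cons, List.range'_succ, List.foldl_cons, List.zipIdx_cons, pvInner]
    rw [hc]
    exact ih (k + 1) h' _

-- Bridge: B's inner fold over `List.range cols` with indexing equals pvInner over the
-- zipIdx of the first `cols` characters, for a row of length ≥ cols.
theorem pvBridge (cols i : Nat) (s : String) (h : cols ≤ s.toList.length)
    (st : List (List Char) × List (List Char)) :
    (List.range cols).foldl
      (fun (st2 : List (List Char) × List (List Char)) (j : Nat) =>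
        let ch := (PySem.Str.pyGet? s (j : Int)).getD ' '
        (st2.1.modify (i + j) (fun b => b ++ [ch]),
         st2.2.modify (i + cols - 1 - j) (fun b => b ++ [ch]))) st
    = pvInner cols i st (s.toList.take cols).zipIdx := by
  have hlen : (s.toList.take cols).length = cols := by rw [List.length_take]; omega
  have hr : List.range' 0 cols = List.range' 0 (s.toList.take cols).length := by rw [hlen]
  rw [List.range_eq_range', hr]
  refine pvBridge' cols i s (s.toList.take cols) 0 (fun m hm => ?_) st
  rw [hlen] at hm
  rw [List.getElem?_take, if_pos (by omega), Nat.zero_add]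

theorem pvAltOuter (cols : Nat) :
    ∀ (l : List (String × Nat)), (∀ p ∈ l, cols ≤ p.1.toList.length) →
    ∀ st, l.foldl
      (fun (st : List (List Char) × List (List Char)) (ri : String × Nat) =>
        (List.range cols).foldl
          (fun (st2 : List (List Char) × List (List Char)) (j : Nat) =>
            let ch := (PySem.Str.pyGet? ri.1 (j : Int)).getD ' '
            (st2.1.modify (ri.2 + j) (fun b => b ++ [ch]),
             st2.2.modify (ri.2 + cols - 1 - j) (fun b => b ++ [ch]))) st) st
      = pvOuter cols st l := by
  intro l
  induction l with
  | nil => intro _ st; simp [pvOuter]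
  | cons p l ih =>
    intro h st
    simp only [List.foldl_cons, pvOuter] at *
    rw [pvBridge cols p.2 p.1 (h p (by simp)) st]
    exact ih (fun q hq => h q (by simp [hq])) _

theorem pvInner_len (cols i : Nat) (l : List (Char × Nat)) :
    ∀ st : List (List Char) × List (List Char),
      (pvInner cols i st l).1.length = st.1.length ∧ (pvInner cols i st l).2.length = st.2.length := by
  induction l with
  | nil => intro st; simp [pvInner]
  | cons c l ih =>
    intro st
    have h := ih (st.1.modify (i + c.2) (fun b => b ++ [c.1]),
      st.2.modify (i + cols - 1 - c.2) (fun b => b ++ [c.1]))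
    simpa [pvInner, List.length_modify] using h

theorem pvOuter_len (cols : Nat) (l : List (String × Nat)) :
    ∀ st : List (List Char) × List (List Char),
      (pvOuter cols st l).1.length = st.1.length ∧ (pvOuter cols st l).2.length = st.2.length := by
  induction l with
  | nil => intro st; simp [pvOuter]
  | cons p l ih =>
    intro st
    have h1 := pvInner_len cols p.2 (p.1.toList.take cols).zipIdx st
    have h := ih (pvInner cols p.2 st (p.1.toList.take cols).zipIdx)
    simp only [pvOuter, List.foldl_cons] at h ⊢
    omega

theorem pvInner_get (cols i : Nat) (ys : List Char) :
    ∀ (k : Nat) (st : List (List Char) × List (List Char)) (d : Nat), k + ys.length ≤ cols →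
      (pvInner cols i st (ys.zipIdx k)).1[d]? =
        st.1[d]?.map (fun b => b ++
          (if i + k ≤ d ∧ d < i + k + ys.length then [ys.getD (d - i - k) ' '] else [])) ∧
      (pvInner cols i st (ys.zipIdx k)).2[d]? =
        st.2[d]?.map (fun b => b ++
          (if d + k + 1 ≤ i + cols ∧ i + cols ≤ d + k + ys.length then
            [ys.getD (i + cols - 1 - d - k) ' '] else [])) := by
  induction ys with
  | nil =>
    intro k st d hk
    refine ⟨?_, ?_⟩
    · simp only [List.zipIdx_nil, pvInner, List.foldl_nil, List.length_nil]
      rw [if_neg (by omega)]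
      cases st.1[d]? <;> simp
    · simp only [List.zipIdx_nil, pvInner, List.foldl_nil, List.length_nil]
      rw [if_neg (by omega)]
      cases st.2[d]? <;> simp
  | cons c ys ih =>
    intro k st d hk
    simp only [List.length_cons] at hk ⊢
    have hstep : pvInner cols i st ((c :: ys).zipIdx k)
        = pvInner cols i
            (st.1.modify (i + k) (fun b => b ++ [c]),
             st.2.modify (i + cols - 1 - k) (fun b => b ++ [c]))
            (ys.zipIdx (k + 1)) := by
      simp [pvInner, List.zipIdx_cons]
    obtain ⟨h1, h2⟩ := ih (k + 1)
      (st.1.modify (i + k) (fun b => b ++ [c]),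
       st.2.modify (i + cols - 1 - k) (fun b => b ++ [c])) d (by omega)
    rw [hstep]
    refine ⟨?_, ?_⟩
    · rw [h1]
      simp only [List.getElem?_modify]
      cases hsd : st.1[d]? with
      | none => simp
      | some b =>
        simp only [Option.map_eq_map, Option.map_some]
        congr 1
        by_cases hd : i + k = d
        · have h0 : d - i - k = 0 := by omega
          rw [if_pos hd, if_neg (by omega), if_pos (by omega), h0]
          simp
        · rw [if_neg hd]
          by_cases hc : i + k ≤ d ∧ d < i + k + (ys.length + 1)
          · have hc' : i + (k + 1) ≤ d ∧ d < i + (k + 1) + ys.length := by omega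
            rw [if_pos hc', if_pos hc]
            have hidx : d - i - k = (d - i - (k + 1)) + 1 := by omega
            rw [hidx]
            simp
          · rw [if_neg (by omega), if_neg hc]
    · rw [h2]
      simp only [List.getElem?_modify]
      cases hsd : st.2[d]? with
      | none => simp
      | some b =>
        simp only [Option.map_eq_map, Option.map_some]
        congr 1
        by_cases hd : i + cols - 1 - k = d
        · have h0 : i + cols - 1 - d - k = 0 := by omega
          rw [if_pos hd, if_neg (by omega), if_pos (by omega), h0]
          simp
        · rw [if_neg hd]
          by_cases hc : d + k + 1 ≤ i + cols ∧ i + cols ≤ d + k + (ys.length + 1)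
          · have hc' : d + (k + 1) + 1 ≤ i + cols ∧ i + cols ≤ d + (k + 1) + ys.length := by
              omega
            rw [if_pos hc', if_pos hc]
            have hidx : i + cols - 1 - d - k = (i + cols - 1 - d - (k + 1)) + 1 := by omega
            rw [hidx]
            simp
          · rw [if_neg (by omega), if_neg hc]

set_option maxHeartbeats 1000000 in
theorem pvOuter_get (cols : Nat) (ls : List String) :
    ∀ (r : Nat) (st : List (List Char) × List (List Char)) (d : Nat),
      (∀ s ∈ ls, cols ≤ s.toList.length) →
      (pvOuter cols st (ls.zipIdx r)).1[d]? =
        st.1[d]?.map (fun b => b ++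
          (List.range' r ls.length).filterMap (fun i =>
            if i ≤ d ∧ d < i + cols then some ((ls.getD (i - r) "").toList.getD (d - i) ' ')
            else none)) ∧
      (pvOuter cols st (ls.zipIdx r)).2[d]? =
        st.2[d]?.map (fun b => b ++
          (List.range' r ls.length).filterMap (fun i =>
            if i ≤ d ∧ d < i + cols then some ((ls.getD (i - r) "").toList.getD (i + cols - 1 - d) ' ')
            else none)) := by
  induction ls with
  | nil =>
    intro r st d _
    refine ⟨?_, ?_⟩
    · simp only [List.zipIdx_nil, pvOuter, List.foldl_nil, List.length_nil, List.range'_zero,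
        List.filterMap_nil]
      cases st.1[d]? <;> simp
    · simp only [List.zipIdx_nil, pvOuter, List.foldl_nil, List.length_nil, List.range'_zero,
        List.filterMap_nil]
      cases st.2[d]? <;> simp
  | cons s ls ih =>
    intro r st d hall
    have hcols : cols ≤ s.toList.length := hall s (by simp)
    have hall' : ∀ t ∈ ls, cols ≤ t.toList.length := fun t ht => hall t (by simp [ht])
    have hylen : (s.toList.take cols).length = cols := by
      rw [List.length_take]; omega
    have hstep : pvOuter cols st ((s :: ls).zipIdx r)
        = pvOuter cols
            (pvInner cols r st (s.toList.take cols).zipIdx)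
            (ls.zipIdx (r + 1)) := by
      simp [pvOuter, List.zipIdx_cons]
    obtain ⟨g1, g2⟩ := pvInner_get cols r (s.toList.take cols) 0 st d (by omega)
    obtain ⟨G1, G2⟩ := ih (r + 1)
      (pvInner cols r st (s.toList.take cols).zipIdx) d hall'
    rw [hstep]
    simp only [Nat.add_zero, Nat.sub_zero] at g1 g2
    rw [hylen] at g1 g2
    have hT1 : (List.range' (r + 1) ls.length).filterMap (fun i =>
          if i ≤ d ∧ d < i + cols then some (((s :: ls).getD (i - r) "").toList.getD (d - i) ' ')
          else none)
        = (List.range' (r + 1) ls.length).filterMap (fun i =>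
          if i ≤ d ∧ d < i + cols then some ((ls.getD (i - (r + 1)) "").toList.getD (d - i) ' ')
          else none) := by
      refine List.filterMap_congr (fun i hi => ?_)
      have hri : r + 1 ≤ i := (List.mem_range'_1.mp hi).1
      have hiw : i - r = (i - (r + 1)) + 1 := by omega
      rw [hiw, List.getD_cons_succ]
    have hT2 : (List.range' (r + 1) ls.length).filterMap (fun i =>
          if i ≤ d ∧ d < i + cols then
            some (((s :: ls).getD (i - r) "").toList.getD (i + cols - 1 - d) ' ')
          else none)
        = (List.range' (r + 1) ls.length).filterMap (fun i =>
          if i ≤ d ∧ d < i + cols then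
            some ((ls.getD (i - (r + 1)) "").toList.getD (i + cols - 1 - d) ' ')
          else none) := by
      refine List.filterMap_congr (fun i hi => ?_)
      have hri : r + 1 ≤ i := (List.mem_range'_1.mp hi).1
      have hiw : i - r = (i - (r + 1)) + 1 := by omega
      rw [hiw, List.getD_cons_succ]
    refine ⟨?_, ?_⟩
    · rw [G1, g1]
      cases hsd : st.1[d]? with
      | none => simp
      | some b =>
        simp only [Option.map_some]
        congr 1
        rw [List.length_cons, List.range'_succ]
        have hcons : (r :: List.range' (r + 1) ls.length).filterMap (fun i =>
              if i ≤ d ∧ d < i + cols then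
                some (((s :: ls).getD (i - r) "").toList.getD (d - i) ' ')
              else none)
            = (if r ≤ d ∧ d < r + cols then [s.toList.getD (d - r) ' '] else [])
              ++ (List.range' (r + 1) ls.length).filterMap (fun i =>
                if i ≤ d ∧ d < i + cols then
                  some (((s :: ls).getD (i - r) "").toList.getD (d - i) ' ')
                else none) := by
          by_cases hc : r ≤ d ∧ d < r + cols <;> simp [hc]
        rw [hcons, hT1]
        by_cases hc : r ≤ d ∧ d < r + cols
        · rw [if_pos (show r ≤ d ∧ d < r + cols from hc), if_pos hc]
          have hch : (s.toList.take cols).getD (d - r) ' '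
              = s.toList.getD (d - r) ' ' := by
            rw [List.getD_eq_getElem?_getD, List.getD_eq_getElem?_getD, List.getElem?_take,
              if_pos (by omega)]
          rw [hch]
          simp
        · rw [if_neg hc, if_neg hc]
          simp
    · rw [G2, g2]
      cases hsd : st.2[d]? with
      | none => simp
      | some b =>
        simp only [Option.map_some]
        congr 1
        rw [List.length_cons, List.range'_succ]
        have hcons : (r :: List.range' (r + 1) ls.length).filterMap (fun i =>
              if i ≤ d ∧ d < i + cols then
                some (((s :: ls).getD (i - r) "").toList.getD (i + cols - 1 - d) ' ')
              else none)
            = (if r ≤ d ∧ d < r + cols then [s.toList.getD (r + cols - 1 - d) ' '] else [])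
              ++ (List.range' (r + 1) ls.length).filterMap (fun i =>
                if i ≤ d ∧ d < i + cols then
                  some (((s :: ls).getD (i - r) "").toList.getD (i + cols - 1 - d) ' ')
                else none) := by
          by_cases hc : r ≤ d ∧ d < r + cols <;> simp [hc]
        rw [hcons, hT2]
        by_cases hc : r ≤ d ∧ d < r + cols
        · rw [if_pos (show d + 1 ≤ r + cols ∧ r + cols ≤ d + cols by omega), if_pos hc]
          have hch : (s.toList.take cols).getD (r + cols - 1 - d) ' '
              = s.toList.getD (r + cols - 1 - d) ' ' := by
            rw [List.getD_eq_getElem?_getD, List.getD_eq_getElem?_getD, List.getElem?_take,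
              if_pos (by omega)]
          rw [hch]
          simp
        · rw [if_neg (by omega), if_neg hc]
          simp

theorem pvArange (F : Int → Char) (cols d : Nat) :
    ∀ r : Nat,
      (PySem.List.pyRange (max 0 ((d : Int) - cols + 1)) (min ((d : Int) + 1) (r : Int))).map F
        = (List.range r).filterMap (fun i => if i ≤ d ∧ d < i + cols then some (F i) else none) := by
  intro r
  induction r with
  | zero =>
    have h1 : min ((d : Int) + 1) ((0 : Nat) : Int) = 0 := by simp; omega
    rw [h1, PySem.List.pyRange_one_eq_nil (le_max_left 0 _)]
    simp
  | succ r ih =>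
    rw [List.range_succ, List.filterMap_append, ← ih]
    have hsing : List.filterMap
        (fun i => if i ≤ d ∧ d < i + cols then some (F ↑i) else none) [r]
        = (if r ≤ d ∧ d < r + cols then [F ↑r] else []) := by
      by_cases h : r ≤ d ∧ d < r + cols <;> simp [h]
    rw [hsing]
    by_cases h1 : r ≤ d ∧ d < r + cols
    · have e1 : min ((d : Int) + 1) (((r + 1 : Nat)) : Int) = ((r : Nat) : Int) + 1 := by omega
      have e2 : min ((d : Int) + 1) ((r : Nat) : Int) = ((r : Nat) : Int) := by omega
      rw [e1, e2, PySem.List.pyRange_one_succ_right (by omega), List.map_append, if_pos h1]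
      simp
    · rw [if_neg h1]
      rcases Nat.lt_or_ge d r with hdr | hdr
      · have e1 : min ((d : Int) + 1) (((r + 1 : Nat)) : Int) = (d : Int) + 1 := by omega
        have e2 : min ((d : Int) + 1) ((r : Nat) : Int) = (d : Int) + 1 := by omega
        rw [e1, e2, List.append_nil]
      · have hge : r + cols ≤ d := by omega
        rw [PySem.List.pyRange_one_eq_nil (by omega),
          PySem.List.pyRange_one_eq_nil (by omega)]
        simp

theorem pvHead_eq (lines : List String) : (PySem.List.pyGet? lines 0).getD "" = lines.headD "" := by
  cases lines <;> simp [PySem.List.pyGet?_zero]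

-- ===== VERDICT (by name: the statement is the Claim_ definition above) =====
theorem get_diagonals_spec : Claim_equal_get_diagonals := by
  unfold Claim_equal_get_diagonals
  intro lines _ hpre
  obtain ⟨hne, hall⟩ := hpre
  unfold Spec_get_diagonals
  have hrows1 : 1 ≤ lines.length := List.length_pos_of_ne_nil hne
  have hmem : ∀ p ∈ lines.zipIdx, (lines.headD "").toList.length ≤ p.1.toList.length := by
    intro p hp
    exact hall p.1 (List.fst_mem_of_mem_zipIdx hp)
  have halt : get_diagonals_alt lines =
      (pvOuter ((lines.headD "").toList.length)
        (List.replicate (lines.length + (lines.headD "").toList.length - 1) [],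
         List.replicate (lines.length + (lines.headD "").toList.length - 1) [])
        lines.zipIdx).1.map String.ofList ++
      (pvOuter ((lines.headD "").toList.length)
        (List.replicate (lines.length + (lines.headD "").toList.length - 1) [],
         List.replicate (lines.length + (lines.headD "").toList.length - 1) [])
        lines.zipIdx).2.map String.ofList := by
    simp only [get_diagonals_alt]
    rw [pvHead_eq lines, pvAltOuter ((lines.headD "").toList.length) lines.zipIdx hmem]
  rw [halt]
  simp only [get_diagonals]
  rw [pvHead_eq lines, PySem.Str.len_eq]
  have hNcast : (lines.length : Int) + ((lines.headD "").toList.length : Int) - 1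
      = ((lines.length + (lines.headD "").toList.length - 1 : Nat) : Int) := by omega
  rw [hNcast]
  obtain ⟨hm, ha⟩ := pvOuter_len ((lines.headD "").toList.length) lines.zipIdx
    (List.replicate (lines.length + (lines.headD "").toList.length - 1) [],
     List.replicate (lines.length + (lines.headD "").toList.length - 1) [])
  simp only [List.length_replicate] at hm ha
  have hNN : (((lines.length + (lines.headD "").toList.length - 1 : Nat) : Int) - 0).toNat
      = lines.length + (lines.headD "").toList.length - 1 := by omega
  have hout := pvOuter_get ((lines.headD "").toList.length) lines 0
    (List.replicate (lines.length + (lines.headD "").toList.length - 1) [],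
     List.replicate (lines.length + (lines.headD "").toList.length - 1) [])
  apply List.ext_getElem?
  intro k
  by_cases hk : k < lines.length + (lines.headD "").toList.length - 1
  · rw [List.getElem?_append_left
        (by simp only [List.length_map, PySem.List.length_pyRange_one, hNN]; omega),
      List.getElem?_append_left (by simp only [List.length_map, hm]; omega)]
    rw [PySem.List.getElem?_map_pyRange_zero _ _ k hk]
    rw [List.getElem?_map, (hout k hall).1, List.getElem?_replicate, if_pos hk]
    simp only [Option.map_some, List.nil_append, Nat.sub_zero, ← List.range_eq_range']
    rw [pvArange]
    refine congrArg (fun l => some (String.ofList l)) (List.filterMap_congr fun i hi => ?_)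
    have hiR : i < lines.length := List.mem_range.mp hi
    by_cases hc : i ≤ k ∧ k < i + (lines.headD "").toList.length
    · rw [if_pos hc, if_pos hc]
      congr 1
      have h1 : (PySem.List.pyGet? lines (i : Int)).getD "" = lines.getD i "" := by
        rw [PySem.List.pyGet?_natCast, List.getD_eq_getElem?_getD]
      have hcast : ((k : Int) - (i : Int)) = ((k - i : Nat) : Int) := by omega
      rw [h1, PySem.Str.pyGet?_eq, hcast]
      simp only [PySem.Chars.pyGet?]
      rw [PySem.List.pyGet?_natCast]
      simp [List.getD_eq_getElem?_getD]
    · rw [if_neg hc, if_neg hc]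
  · by_cases hk2 : k < (lines.length + (lines.headD "").toList.length - 1)
        + (lines.length + (lines.headD "").toList.length - 1)
    · rw [List.getElem?_append_right
          (by simp only [List.length_map, PySem.List.length_pyRange_one, hNN]; omega),
        List.getElem?_append_right (by simp only [List.length_map, hm]; omega)]
      simp only [List.length_map, PySem.List.length_pyRange_one, hNN, hm]
      rw [PySem.List.getElem?_map_pyRange_zero _ _ _ (by omega)]
      rw [List.getElem?_map, (hout _ hall).2, List.getElem?_replicate, if_pos (by omega)]
      simp only [Option.map_some, List.nil_append, Nat.sub_zero, ← List.range_eq_range']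
      rw [pvArange]
      refine congrArg (fun l => some (String.ofList l)) (List.filterMap_congr fun i hi => ?_)
      have hiR : i < lines.length := List.mem_range.mp hi
      by_cases hc : i ≤ k - (lines.length + (lines.headD "").toList.length - 1)
          ∧ k - (lines.length + (lines.headD "").toList.length - 1)
            < i + (lines.headD "").toList.length
      · rw [if_pos hc, if_pos hc]
        congr 1
        have h1 : (PySem.List.pyGet? lines (i : Int)).getD "" = lines.getD i "" := by
          rw [PySem.List.pyGet?_natCast, List.getD_eq_getElem?_getD]
        have hcast : (((lines.headD "").toList.length : Int) - 1
              - (((k - (lines.length + (lines.headD "").toList.length - 1) : Nat) : Int)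
                  - (i : Int)))
            = ((i + (lines.headD "").toList.length - 1
                - (k - (lines.length + (lines.headD "").toList.length - 1)) : Nat) : Int) := by
          omega
        rw [h1, PySem.Str.pyGet?_eq, hcast]
        simp only [PySem.Chars.pyGet?]
        rw [PySem.List.pyGet?_natCast]
        simp [List.getD_eq_getElem?_getD]
      · rw [if_neg hc, if_neg hc]
    · rw [List.getElem?_eq_none (by
          simp only [List.length_append, List.length_map, PySem.List.length_pyRange_one, hNN]
          omega),
        List.getElem?_eq_none (by
          simp only [List.length_append, List.length_map, hm, ha]
          omega)]
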